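-- pv_equiv track=rewrite | github.com/bruhismyname/Praktikum-ASA-D2 | Pertemuan 3/penjelajahan.py | cari_jalur
-- ===== SOURCE A (Python) =====
-- def cari_jalur(data, kiri, kanan):
--     if kanan - kiri == 1:
--         return abs(data[kiri][0] - data[kanan][0]), min(data[kiri][1], data[kanan][1])
--
--     tengah = (kiri + kanan) // 2
--
--     sel_kiri, idx_kiri = cari_jalur(data, kiri, tengah)
--     sel_kanan, idx_kanan = cari_jalur(data, tengah, kanan)
--
--     if sel_kiri < sel_kanan:
--         return sel_kiri, idx_kiri
--     elif sel_kiri > sel_kanan: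
--         return sel_kanan, idx_kanan
--     else:
--         return sel_kiri, min(idx_kiri, idx_kanan)
-- ===== SOURCE B (Python) =====
-- def cari_jalur(data, kiri, kanan):
--     return min((abs(data[i][0] - data[i + 1][0]), min(data[i][1], data[i + 1][1]))
--                for i in range(kiri, kanan))
-- ===== Notes on version B (the rewrite author's own statement) =====
-- stated objective: idiomatic
-- what changed: Replaced the divide-and-conquer recursion over index intervals by a single min() over a generator of (difference, min-value) tuples; Python's lexicographic tuple comparison realises A's tie-break.
import Mathlib
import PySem

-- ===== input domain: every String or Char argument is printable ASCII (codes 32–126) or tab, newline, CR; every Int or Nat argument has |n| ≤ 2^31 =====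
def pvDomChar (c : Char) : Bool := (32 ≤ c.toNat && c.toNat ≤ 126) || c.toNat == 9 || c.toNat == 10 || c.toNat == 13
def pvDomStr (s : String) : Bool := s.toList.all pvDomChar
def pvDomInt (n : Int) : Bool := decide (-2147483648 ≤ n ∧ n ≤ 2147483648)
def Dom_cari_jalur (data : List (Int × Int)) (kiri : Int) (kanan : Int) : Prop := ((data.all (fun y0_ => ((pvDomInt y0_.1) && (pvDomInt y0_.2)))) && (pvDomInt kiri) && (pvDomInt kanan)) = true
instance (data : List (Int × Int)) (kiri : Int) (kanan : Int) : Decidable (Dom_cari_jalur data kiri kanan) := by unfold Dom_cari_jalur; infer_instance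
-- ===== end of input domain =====

-- B replaces A's divide-and-conquer recursion by a single min() over the adjacent-pair tuples
-- (idiomatic; Python's lexicographic tuple comparison realises A's tie-break).


-- ===== PORT A =====
-- data[i] (possibly negative index); Pre_ keeps every access in range, the default is never reached there
def pvGetPair (data : List (Int × Int)) (i : Int) : Int × Int :=
  (PySem.List.pyGet? data i).getD (0, 0)

-- fdiv bounds used by the termination proof of the port (cited in decreasing_by)
theorem pvTengah_bounds (kiri kanan : Int) (h : 2 ≤ kanan - kiri) :
    kiri + 1 ≤ PySem.Int.floordiv (kiri + kanan) 2 ∧ PySem.Int.floordiv (kiri + kanan) 2 ≤ kanan - 1 := by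
  have h2 : PySem.Int.floordiv (kiri + kanan) 2 = (kiri + kanan) / 2 := by
    simp [PySem.Int.floordiv, Int.fdiv_eq_ediv]
  rw [h2]
  omega

def cari_jalur (data : List (Int × Int)) (kiri : Int) (kanan : Int) : Int × Int :=
  if kanan - kiri = 1 then
    (|(pvGetPair data kiri).1 - (pvGetPair data kanan).1|,
     min (pvGetPair data kiri).2 (pvGetPair data kanan).2)
  else if kanan - kiri < 1 then (0, 0)  -- Python recurses forever here (RecursionError); totality guard, outside Pre_
  else
    let tengah := PySem.Int.floordiv (kiri + kanan) 2
    let L := cari_jalur data kiri tengah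
    let R := cari_jalur data tengah kanan
    if L.1 < R.1 then L
    else if L.1 > R.1 then R
    else (L.1, min L.2 R.2)
termination_by (kanan - kiri).toNat
decreasing_by
  · have := pvTengah_bounds kiri kanan (by omega); omega
  · have := pvTengah_bounds kiri kanan (by omega); omega

-- ===== PORT B =====
-- the (sel, val) tuple the generator yields at index i
def pairAt (data : List (Int × Int)) (i : Int) : Int × Int :=
  (|(pvGetPair data i).1 - (pvGetPair data (i + 1)).1|,
   min (pvGetPair data i).2 (pvGetPair data (i + 1)).2)

-- min(generator); Python compares the tuples lexicographically (min2? with fst/snd keys);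
-- on an empty range Python's min raises ValueError: getD default, outside Pre_
def cari_jalur_alt (data : List (Int × Int)) (kiri : Int) (kanan : Int) : Int × Int :=
  (PySem.List.min2? ((PySem.List.pyRange kiri kanan 1).map (pairAt data)) Prod.fst Prod.snd).getD (0, 0)

-- ===== PRECONDITION & SPEC =====
-- Pre_ = exactly the inputs on which A returns: at least one adjacent pair, every index in [kiri, kanan] valid for Python indexing
-- (on kanan ≤ kiri A raises RecursionError and B's min() raises ValueError; out-of-range indices raise IndexError)
def Pre_cari_jalur (data : List (Int × Int)) (kiri : Int) (kanan : Int) : Prop :=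
  kiri + 1 ≤ kanan ∧ -(data.length : Int) ≤ kiri ∧ kanan < (data.length : Int)
instance (data : List (Int × Int)) (kiri : Int) (kanan : Int) : Decidable (Pre_cari_jalur data kiri kanan) := by unfold Pre_cari_jalur; infer_instance

def pvWitness_cari_jalur : (List (Int × Int)) × Int × Int := ([(1, 5), (3, 2), (4, 7)], 0, 2)

def Spec_cari_jalur (data : List (Int × Int)) (kiri : Int) (kanan : Int) (out : Int × Int) : Prop := out = cari_jalur_alt data kiri kanan
instance (data : List (Int × Int)) (kiri : Int) (kanan : Int) (out : Int × Int) : Decidable (Spec_cari_jalur data kiri kanan out) := by unfold Spec_cari_jalur; infer_instance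

-- ===== CLAIM =====
def Claim_equal_cari_jalur : Prop := ∀ (data : List (Int × Int)) (kiri : Int) (kanan : Int), Dom_cari_jalur data kiri kanan → Pre_cari_jalur data kiri kanan → Spec_cari_jalur data kiri kanan (cari_jalur data kiri kanan)

-- ===== LEMMAS AND PROOFS =====

-- the order-independent "min key, min value on key ties" merge = binary lexicographic min
def pvComb (a b : Int × Int) : Int × Int :=
  if b.1 < a.1 then b else if a.1 < b.1 then a else (a.1, min a.2 b.2)

theorem pvComb_assoc (a b c : Int × Int) : pvComb a (pvComb b c) = pvComb (pvComb a b) c := by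
  obtain ⟨a1, a2⟩ := a; obtain ⟨b1, b2⟩ := b; obtain ⟨c1, c2⟩ := c
  simp only [pvComb]
  split_ifs <;> simp_all [Prod.ext_iff] <;> omega

theorem foldl_pvComb_comb (l : List (Int × Int)) (x y : Int × Int) :
    l.foldl pvComb (pvComb x y) = pvComb x (l.foldl pvComb y) := by
  induction l generalizing y with
  | nil => rfl
  | cons h t ih => simpa [List.foldl, ← pvComb_assoc] using ih (pvComb y h)

theorem foldl_pvComb_append (l1 l2 : List (Int × Int)) (h1 h2 : Int × Int) :
    (l1 ++ h2 :: l2).foldl pvComb h1 = pvComb (l1.foldl pvComb h1) (l2.foldl pvComb h2) := by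
  rw [List.foldl_append, List.foldl_cons, foldl_pvComb_comb]

-- the list of pair-values for indices a, a+1, …, a+n-1 (proof-side helper)
def pairList (data : List (Int × Int)) (a : Int) : Nat → List (Int × Int)
  | 0 => []
  | n + 1 => pairAt data a :: pairList data (a + 1) n

theorem pairList_add (data : List (Int × Int)) (a : Int) (m n : Nat) :
    pairList data a (m + n) = pairList data a m ++ pairList data (a + (m : Int)) n := by
  induction m generalizing a with
  | zero => simp [pairList]
  | succ k ih =>
    have : k + 1 + n = (k + n) + 1 := by omega
    rw [this]
    simp only [pairList, ih (a + 1), List.cons_append]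
    have : a + 1 + (k : Int) = a + ((k : Int) + 1) := by ring
    rw [this]
    push_cast
    ring_nf

-- A computes the pvComb-fold of the pair values of the interval
theorem cari_jalur_eq_fold (data : List (Int × Int)) (kiri kanan : Int) (h : 1 ≤ kanan - kiri) :
    cari_jalur data kiri kanan =
      (pairList data (kiri + 1) (kanan - kiri - 1).toNat).foldl pvComb (pairAt data kiri) := by
  by_cases hb : kanan - kiri = 1
  · rw [cari_jalur, if_pos hb]
    have h0 : (kanan - kiri - 1).toNat = 0 := by omega
    have hk : kanan = kiri + 1 := by omega
    rw [h0]
    simp [pairList, pairAt, hk]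
  · have h2 : 2 ≤ kanan - kiri := by omega
    rw [cari_jalur]
    have hng : ¬ (kanan - kiri < 1) := by omega
    simp only [if_neg hb, if_neg hng]
    obtain ⟨hl, hr⟩ := pvTengah_bounds kiri kanan h2
    set tengah := PySem.Int.floordiv (kiri + kanan) 2 with ht
    have ihL := cari_jalur_eq_fold data kiri tengah (by omega)
    have ihR := cari_jalur_eq_fold data tengah kanan (by omega)
    rw [ihL, ihR]
    have hsplit : (kanan - kiri - 1).toNat = (tengah - kiri - 1).toNat + ((kanan - tengah - 1).toNat + 1) := by omega
    rw [hsplit, pairList_add]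
    have hmid : kiri + 1 + (((tengah - kiri - 1).toNat : Nat) : Int) = tengah := by omega
    rw [hmid]
    simp only [pairList]
    rw [foldl_pvComb_append]
    set L := (pairList data (kiri + 1) (tengah - kiri - 1).toNat).foldl pvComb (pairAt data kiri)
    set R := (pairList data (tengah + 1) (kanan - tengah - 1).toNat).foldl pvComb (pairAt data tengah)
    simp only [pvComb, gt_iff_lt]
    split_ifs <;> simp_all [Prod.ext_iff] <;> omega
termination_by (kanan - kiri).toNat
decreasing_by
  · omega
  · omega

-- min2?'s fold with fst/snd keys, once started, is the pvComb fold
theorem foldl_step_some (f : Option (Int × Int) → (Int × Int) → Option (Int × Int))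
    (hf : ∀ m x, f (some m) x = some (pvComb m x)) (t : List (Int × Int)) (m : Int × Int) :
    t.foldl f (some m) = some (t.foldl pvComb m) := by
  induction t generalizing m with
  | nil => rfl
  | cons h t ih => rw [List.foldl_cons, hf]; exact ih (pvComb m h)

-- min2? on a nonempty list = the running lexicographic-min loop, whose binary step is pvComb
theorem min2_cons_fold (h : Int × Int) (t : List (Int × Int)) :
    PySem.List.min2? (h :: t) Prod.fst Prod.snd = some (t.foldl pvComb h) := by
  simp only [PySem.List.min2?]
  rw [List.foldl_cons]
  refine foldl_step_some _ ?_ t h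
  intro m x
  show (if (decide (x.1 < m.1) || !decide (m.1 < x.1) && decide (x.2 < m.2)) = true
          then some x else some m) = some (pvComb m x)
  obtain ⟨m1, m2⟩ := m; obtain ⟨x1, x2⟩ := x
  simp only [pvComb]
  split_ifs <;> simp_all [Prod.ext_iff] <;> omega

-- the mapped range is pairList
theorem pairList_eq_map (data : List (Int × Int)) (a : Int) (n : Nat) :
    pairList data a n = (List.range n).map (fun k : Nat => pairAt data (a + (k : Int))) := by
  induction n generalizing a with
  | zero => rfl
  | succ m ih =>
    rw [List.range_succ_eq_map, List.map_cons, List.map_map]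
    simp only [pairList]
    refine congrArg₂ _ (by norm_num) ?_
    rw [ih (a + 1)]
    apply List.map_congr_left
    intro k _
    simp only [Function.comp_apply]
    congr 1
    push_cast
    ring

-- B computes the same fold
theorem cari_jalur_alt_eq_fold (data : List (Int × Int)) (kiri kanan : Int) (h : 1 ≤ kanan - kiri) :
    cari_jalur_alt data kiri kanan =
      (pairList data (kiri + 1) (kanan - kiri - 1).toNat).foldl pvComb (pairAt data kiri) := by
  have hmap : (PySem.List.pyRange kiri kanan 1).map (pairAt data) = pairList data kiri (kanan - kiri).toNat := by
    rw [PySem.List.pyRange_one, List.map_map, pairList_eq_map]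
    simp [Function.comp_def]
  have hn : (kanan - kiri).toNat = (kanan - kiri - 1).toNat + 1 := by omega
  rw [cari_jalur_alt, hmap, hn]
  simp only [pairList]
  rw [min2_cons_fold]
  rfl

-- ===== VERDICT =====
theorem cari_jalur_spec : Claim_equal_cari_jalur := by
  intro data kiri kanan _ hpre
  unfold Spec_cari_jalur
  obtain ⟨h1, h2, h3⟩ := hpre
  rw [cari_jalur_eq_fold data kiri kanan (by omega),
      cari_jalur_alt_eq_fold data kiri kanan (by omega)]
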